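-- pv_equiv track=rewrite | github.com/FreyaJain/Metro_App | graph_m.py | get_Interchanges
-- ===== SOURCE A (Python) =====
-- def get_Interchanges(path):
--     result = []
--     for i in range(len(path) - 1):
--         src, dest = path[i], path[i + 1]
--         if src[-1] != dest[-1]:
--             result.append(src)
--     result.append(path[-1])  # add the last station
--     return result
-- ===== SOURCE B (Python) =====
-- def get_Interchanges(path):
--     # Single backward pass: keep the last station of each maximal run of
--     # equal line-ids (last character), tracking the current run key.
--     out = []
--     key = None
--     for s in reversed(path):
--         k = s[-1:]
--         if k != key:
--             out.append(s)
--             key = k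
--     out.reverse()
--     return out
-- ===== Notes on version B (the rewrite author's own statement) =====
-- stated objective: alternative
-- what changed: Replaces the index-based pairwise comparison loop plus separate final append with a single backward run-grouping pass that keeps the first element of each run of equal line-id (last character) in the reversed path and reverses the result.
import Mathlib
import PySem

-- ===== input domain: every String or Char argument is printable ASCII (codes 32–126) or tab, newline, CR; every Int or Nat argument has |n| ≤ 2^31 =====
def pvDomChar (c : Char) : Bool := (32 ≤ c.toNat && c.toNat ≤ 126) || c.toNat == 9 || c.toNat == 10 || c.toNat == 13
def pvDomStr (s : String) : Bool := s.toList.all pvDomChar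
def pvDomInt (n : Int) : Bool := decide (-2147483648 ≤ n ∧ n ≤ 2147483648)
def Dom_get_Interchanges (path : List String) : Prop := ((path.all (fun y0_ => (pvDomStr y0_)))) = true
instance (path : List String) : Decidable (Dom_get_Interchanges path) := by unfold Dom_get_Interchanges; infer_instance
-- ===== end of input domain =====

-- B replaces A's index-based pairwise loop with a single backward run-grouping pass
-- (keep the first station of each run of equal last character in the reversed path);
-- objective: alternative (same O(n) cost, different traversal and state).

-- ===== PORT A =====
def get_Interchanges (path : List String) : List String :=
  let result : List String :=
    (PySem.List.pyRange 0 (PySem.List.len path - 1) 1).foldl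
      (fun result i =>
        let src := (PySem.List.pyGet? path i).getD ""
        let dest := (PySem.List.pyGet? path (i + 1)).getD ""
        if PySem.Str.pyGet? src (-1) ≠ PySem.Str.pyGet? dest (-1) then result ++ [src]
        else result)
      []
  result ++ [(PySem.List.pyGet? path (-1)).getD ""]

-- ===== PORT B =====
def get_Interchanges_alt (path : List String) : List String :=
  let st := path.reverse.foldl
    (fun (acc : List String × Option String) s =>
      let k := PySem.Str.slice s (some (-1)) none
      if some k ≠ acc.2 then (acc.1 ++ [s], some k) else acc)
    ([], none)
  st.1.reverse

-- ===== PRECONDITION & SPEC =====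
-- Pre_ is exactly where the Python A returns: it raises IndexError on the empty path
-- (path[-1]) and, when the path has at least two stations, on an empty station name
-- (s[-1] inside the loop).
def Pre_get_Interchanges (path : List String) : Prop :=
  path ≠ [] ∧ (2 ≤ path.length → "" ∉ path)
instance (path : List String) : Decidable (Pre_get_Interchanges path) := by
  unfold Pre_get_Interchanges; infer_instance

def pvWitness_get_Interchanges : List String := ["a1", "b2", "c2"]

def Spec_get_Interchanges (path : List String) (out : List String) : Prop := out = get_Interchanges_alt path
instance (path : List String) (out : List String) : Decidable (Spec_get_Interchanges path out) := by unfold Spec_get_Interchanges; infer_instance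

-- ===== CLAIM (what is proved, stated in full; the proofs are below) =====
def Claim_equal_get_Interchanges : Prop := ∀ (path : List String), Dom_get_Interchanges path → Pre_get_Interchanges path → Spec_get_Interchanges path (get_Interchanges path)

-- ===== LEMMAS AND PROOFS =====

-- the run-boundary stations (A's loop output / B's kept stations except the last one)
def interBody : List String → List String
  | [] => []
  | [_] => []
  | a :: b :: t =>
      (if PySem.Str.pyGet? a (-1) ≠ PySem.Str.pyGet? b (-1) then [a] else []) ++ interBody (b :: t)

-- B's run key s[-1:]
def keyB (s : String) : String := PySem.Str.slice s (some (-1)) none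

def keepB : List String → Option String → List String
  | [], _ => []
  | s :: r, key => if some (keyB s) ≠ key then s :: keepB r (some (keyB s)) else keepB r key

def keyOf : List String → Option String → Option String
  | [], key => key
  | s :: r, _ => keyOf r (some (keyB s))

lemma keepB_cons (s : String) (r : List String) (key : Option String) :
    keepB (s :: r) key = (if some (keyB s) ≠ key then [s] else []) ++ keepB r (some (keyB s)) := by
  by_cases h : some (keyB s) ≠ key
  · simp [keepB, h]
  · simp only [ne_eq, not_not] at h
    simp [keepB, h]

lemma foldB (l : List String) (acc : List String) (key : Option String) :
    l.foldl
      (fun (acc : List String × Option String) s =>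
        let k := PySem.Str.slice s (some (-1)) none
        if some k ≠ acc.2 then (acc.1 ++ [s], some k) else acc)
      (acc, key)
    = (acc ++ keepB l key, keyOf l key) := by
  induction l generalizing acc key with
  | nil => simp [keepB, keyOf]
  | cons s r ih =>
      by_cases h : some (keyB s) ≠ key
      · simp only [List.foldl_cons]
        rw [show (if some (PySem.Str.slice s (some (-1)) none) ≠ key then (acc ++ [s], some (PySem.Str.slice s (some (-1)) none)) else (acc, key)) = (acc ++ [s], some (keyB s)) by simp [keyB] at h ⊢; simp [h]]
        rw [ih, keepB_cons]
        simp [h, keyOf]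
      · simp only [ne_eq, not_not] at h
        simp only [List.foldl_cons]
        rw [show (if some (PySem.Str.slice s (some (-1)) none) ≠ key then (acc ++ [s], some (PySem.Str.slice s (some (-1)) none)) else (acc, key)) = (acc, key) by simp [keyB] at h; simp [h]]
        rw [ih, keepB_cons]
        simp [h, keyOf, keepB]

lemma keyOf_eq (l : List String) (key : Option String) :
    keyOf l key = match l.getLast? with | some s => some (keyB s) | none => key := by
  induction l generalizing key with
  | nil => simp [keyOf]
  | cons s r ih =>
      cases r with
      | nil => simp [keyOf]
      | cons b t => simpa [keyOf] using ih (some (keyB s))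

lemma keepB_append (l1 l2 : List String) (key : Option String) :
    keepB (l1 ++ l2) key = keepB l1 key ++ keepB l2 (keyOf l1 key) := by
  induction l1 generalizing key with
  | nil => simp [keepB, keyOf]
  | cons s r ih =>
      simp only [List.cons_append, keepB_cons, keyOf]
      rw [ih]
      simp

lemma dropLast1 (cs : List Char) :
    cs.drop (cs.length - 1) = (cs.getLast?.elim [] fun c => [c]) := by
  induction cs using List.reverseRecOn with
  | nil => simp
  | append_singleton ys z ih => simp

lemma keyB_toList (s : String) :
    (keyB s).toList = s.toList.drop (s.toList.length - 1) := by
  simp [keyB, PySem.Str.toList_slice, PySem.Chars.slice_eq_listSlice, PySem.List.slice_from_neg_one]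

lemma keyA_eq_getLast? (s : String) :
    PySem.Str.pyGet? s (-1) = s.toList.getLast? := by
  simp [PySem.Str.pyGet?, PySem.Chars.pyGet?_eq_listPyGet?, PySem.List.pyGet?_neg_one]

lemma keyEq (a b : String) :
    (keyB a = keyB b) ↔ (PySem.Str.pyGet? a (-1) = PySem.Str.pyGet? b (-1)) := by
  rw [keyA_eq_getLast?, keyA_eq_getLast?]
  constructor
  · intro h
    have h' := congrArg String.toList h
    rw [keyB_toList, keyB_toList, dropLast1, dropLast1] at h'
    cases ha : a.toList.getLast? <;> cases hb : b.toList.getLast? <;>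
      simp_all
  · intro h
    have : (keyB a).toList = (keyB b).toList := by
      rw [keyB_toList, keyB_toList, dropLast1, dropLast1, h]
    exact String.ext (by simpa [String.toList] using this)

-- A's loop over indices equals interBody
lemma loopA (path : List String) (acc : List String) :
    (List.range (path.length - 1)).foldl
      (fun acc k =>
        if PySem.Str.pyGet? ((path[k]?).getD "") (-1) ≠ PySem.Str.pyGet? ((path[k+1]?).getD "") (-1)
        then acc ++ [(path[k]?).getD ""] else acc)
      acc
    = acc ++ interBody path := by
  induction path generalizing acc with
  | nil => simp [interBody]
  | cons a r ih =>
      cases r with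
      | nil => simp [interBody]
      | cons b t =>
          simp only [List.length_cons, Nat.add_sub_cancel, List.range_succ_eq_map,
            List.foldl_cons, List.foldl_map]
          have hf : (fun (x : List String) (y : Nat) =>
              if PySem.Str.pyGet? (((a :: b :: t))[y.succ]?.getD "") (-1) ≠ PySem.Str.pyGet? (((a :: b :: t))[y.succ + 1]?.getD "") (-1)
              then x ++ [((a :: b :: t))[y.succ]?.getD ""] else x)
            = (fun (x : List String) (y : Nat) =>
              if PySem.Str.pyGet? (((b :: t))[y]?.getD "") (-1) ≠ PySem.Str.pyGet? (((b :: t))[y+1]?.getD "") (-1)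
              then x ++ [((b :: t))[y]?.getD ""] else x) := by
            funext x y
            simp only [Nat.succ_eq_add_one, List.getElem?_cons_succ]
            rfl
          rw [hf]
          have ih' := ih (if PySem.Str.pyGet? (((a :: b :: t))[0]?.getD "") (-1) ≠ PySem.Str.pyGet? (((a :: b :: t))[0+1]?.getD "") (-1)
              then acc ++ [((a :: b :: t))[0]?.getD ""] else acc)
          simp only [List.length_cons, Nat.add_sub_cancel] at ih'
          rw [ih']
          by_cases h : PySem.Str.pyGet? a (-1) ≠ PySem.Str.pyGet? b (-1)
          · simp only [List.getElem?_cons_zero, Option.getD_some, List.getElem?_cons_succ,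
              zero_add, if_pos h, interBody]
            simp [h]
          · simp only [List.getElem?_cons_zero, Option.getD_some, List.getElem?_cons_succ,
              zero_add, if_neg h, interBody]
            simp

lemma A_eq (path : List String) (h : path ≠ []) :
    get_Interchanges path = interBody path ++ [path.getLast?.getD ""] := by
  have hlen : (PySem.List.len path - 1 - 0).toNat = path.length - 1 := by
    simp [PySem.List.len]
  have hcast : (fun (x : List String) (k : Nat) =>
      (fun result i =>
        let src := (PySem.List.pyGet? path i).getD "";
        let dest := (PySem.List.pyGet? path (i + 1)).getD "";
        if PySem.Str.pyGet? src (-1) ≠ PySem.Str.pyGet? dest (-1) then result ++ [src]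
        else result) x ((0 : Int) + (k : Int)))
    = (fun (acc : List String) (k : Nat) =>
        if PySem.Str.pyGet? ((path[k]?).getD "") (-1) ≠ PySem.Str.pyGet? ((path[k+1]?).getD "") (-1)
        then acc ++ [(path[k]?).getD ""] else acc) := by
    funext x k
    have h1 : (0 : Int) + (k : Int) = ((k : Nat) : Int) := by ring
    have h2 : (k : Int) + 1 = (((k+1) : Nat) : Int) := by push_cast; ring
    simp only [h1, h2, PySem.List.pyGet?_natCast]
  show ((PySem.List.pyRange 0 (PySem.List.len path - 1) 1).foldl _ []) ++ _ = _
  rw [PySem.List.pyGet?_neg_one, PySem.List.pyRange_one, hlen, List.foldl_map, hcast,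
    loopA path []]
  simp

lemma B_eq_keep (path : List String) :
    get_Interchanges_alt path = (keepB path.reverse none).reverse := by
  unfold get_Interchanges_alt
  rw [foldB]
  simp

lemma keep_rev (path : List String) (h : path ≠ []) :
    keepB path.reverse none = (path.getLast?.getD "") :: (interBody path).reverse := by
  induction path with
  | nil => exact absurd rfl h
  | cons a r ih =>
      cases r with
      | nil => simp [keepB, interBody]
      | cons b t =>
          have hr : (b :: t : List String) ≠ [] := by simp
          rw [show (a :: b :: t : List String).reverse = (b :: t).reverse ++ [a] by simp]
          rw [keepB_append, ih hr, keyOf_eq]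
          have hl : (b :: t : List String).reverse.getLast? = some b := by
            rw [List.getLast?_reverse]; rfl
          rw [hl]
          have hone : keepB [a] (some (keyB b)) = if keyB a ≠ keyB b then [a] else [] := by
            simp [keepB]
          rw [hone]
          by_cases hk : PySem.Str.pyGet? a (-1) = PySem.Str.pyGet? b (-1)
          · have hkb : keyB a = keyB b := (keyEq a b).mpr hk
            rw [show interBody (a :: b :: t)
                = (if PySem.Str.pyGet? a (-1) ≠ PySem.Str.pyGet? b (-1) then [a] else []) ++ interBody (b :: t)
              from rfl, if_neg (not_not_intro hk), if_neg (not_not_intro hkb)]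
            simp
          · have hkb : keyB a ≠ keyB b := fun e => hk ((keyEq a b).mp e)
            rw [show interBody (a :: b :: t)
                = (if PySem.Str.pyGet? a (-1) ≠ PySem.Str.pyGet? b (-1) then [a] else []) ++ interBody (b :: t)
              from rfl, if_pos hk, if_pos hkb]
            simp

-- ===== VERDICT (by name: the statement is the Claim_ definition above) =====
theorem get_Interchanges_spec : Claim_equal_get_Interchanges := by
  intro path _ hpre
  unfold Spec_get_Interchanges
  obtain ⟨hne, -⟩ := hpre
  rw [A_eq path hne, B_eq_keep, keep_rev path hne]
  simp
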